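-- pv_equiv track=rewrite | github.com/HarperZ9/quanta-universe | calibrate/calibrate_pro/calibration/ccss_import.py | _extract_data_block
-- ===== SOURCE A (Python) =====
-- from typing import Dict, List, Optional, Tuple, Union
--
-- def _extract_data_block(text: str) -> Tuple[List[str], List[List[str]]]:
--     """
--     Extract the field names and data rows between BEGIN_DATA_FORMAT /
--     END_DATA_FORMAT and BEGIN_DATA / END_DATA markers.
--
--     Returns:
--         (fields, rows) where fields is a list of column names and rows
--         is a list of lists of string tokens.
--     """
--     lines = text.splitlines()
--
--     # --- field names ---
--     fields: List[str] = []
--     in_format = False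
--     for line in lines:
--         stripped = line.strip()
--         if stripped == "BEGIN_DATA_FORMAT":
--             in_format = True
--             continue
--         if stripped == "END_DATA_FORMAT":
--             in_format = False
--             continue
--         if in_format and stripped:
--             fields.extend(stripped.split())
--
--     # --- data rows ---
--     rows: List[List[str]] = []
--     in_data = False
--     for line in lines:
--         stripped = line.strip()
--         if stripped == "BEGIN_DATA":
--             in_data = True
--             continue
--         if stripped == "END_DATA":
--             in_data = False
--             continue
--         if in_data and stripped:
--             rows.append(stripped.split())
--
--     return fields, rows
-- ===== SOURCE B (Python) =====
-- def _extract_data_block(text):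
--     """Single pass over the lines, tracking both block flags at once."""
--     fields = []
--     rows = []
--     in_format = False
--     in_data = False
--     for raw in text.splitlines():
--         s = raw.strip()
--         if s == "BEGIN_DATA_FORMAT":
--             in_format = True
--         elif s == "END_DATA_FORMAT":
--             in_format = False
--         elif in_format and s:
--             fields += s.split()
--         if s == "BEGIN_DATA":
--             in_data = True
--         elif s == "END_DATA":
--             in_data = False
--         elif in_data and s:
--             rows.append(s.split())
--     return fields, rows
-- ===== Notes on version B (the rewrite author's own statement) =====
-- stated objective: alternative
-- what changed: Replaces A's two independent passes over the lines (one per marker pair) by a single pass that maintains both block flags and both accumulators in one combined state, handling the format-side and data-side transitions of each line independently so the two marker state machines stay decoupled.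
import Mathlib
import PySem

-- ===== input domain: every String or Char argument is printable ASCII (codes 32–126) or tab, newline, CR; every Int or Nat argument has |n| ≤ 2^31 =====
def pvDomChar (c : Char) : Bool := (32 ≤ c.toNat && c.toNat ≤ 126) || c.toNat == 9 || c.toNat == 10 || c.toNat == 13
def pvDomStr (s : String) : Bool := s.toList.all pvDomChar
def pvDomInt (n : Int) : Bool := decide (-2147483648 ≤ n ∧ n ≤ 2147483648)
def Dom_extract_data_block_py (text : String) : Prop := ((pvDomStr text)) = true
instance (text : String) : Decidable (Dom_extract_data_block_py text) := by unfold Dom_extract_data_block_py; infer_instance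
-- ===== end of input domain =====

-- B replaces A's two passes over the lines by one pass carrying both flags; alternative decomposition, same cost.

-- ===== PORT A =====
-- A's first loop: field names between BEGIN_DATA_FORMAT / END_DATA_FORMAT
def pvFieldLoop : List String → Bool → List String → List String
  | [], _, fields => fields
  | line :: rest, inFormat, fields =>
    let stripped := PySem.Str.strip line
    if stripped = "BEGIN_DATA_FORMAT" then pvFieldLoop rest true fields
    else if stripped = "END_DATA_FORMAT" then pvFieldLoop rest false fields
    else if inFormat = true ∧ stripped ≠ "" then
      pvFieldLoop rest inFormat (fields ++ PySem.Str.split₀ stripped)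
    else pvFieldLoop rest inFormat fields

-- A's second loop: data rows between BEGIN_DATA / END_DATA
def pvDataLoop : List String → Bool → List (List String) → List (List String)
  | [], _, rows => rows
  | line :: rest, inData, rows =>
    let stripped := PySem.Str.strip line
    if stripped = "BEGIN_DATA" then pvDataLoop rest true rows
    else if stripped = "END_DATA" then pvDataLoop rest false rows
    else if inData = true ∧ stripped ≠ "" then
      pvDataLoop rest inData (rows ++ [PySem.Str.split₀ stripped])
    else pvDataLoop rest inData rows

def extract_data_block_py (text : String) : List String × List (List String) :=
  let lines := PySem.Str.splitlines text
  (pvFieldLoop lines false [], pvDataLoop lines false [])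

-- ===== PORT B =====
-- one pass, combined state (in_format, in_data, fields, rows); the two marker machines are stepped independently per line
def pvOneLoop : List String → Bool → Bool → List String → List (List String) →
    List String × List (List String)
  | [], _, _, fields, rows => (fields, rows)
  | line :: rest, inFormat, inData, fields, rows =>
    let s := PySem.Str.strip line
    let (inFormat', fields') :=
      if s = "BEGIN_DATA_FORMAT" then (true, fields)
      else if s = "END_DATA_FORMAT" then (false, fields)
      else if inFormat = true ∧ s ≠ "" then (inFormat, fields ++ PySem.Str.split₀ s)
      else (inFormat, fields)
    let (inData', rows') :=
      if s = "BEGIN_DATA" then (true, rows)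
      else if s = "END_DATA" then (false, rows)
      else if inData = true ∧ s ≠ "" then (inData, rows ++ [PySem.Str.split₀ s])
      else (inData, rows)
    pvOneLoop rest inFormat' inData' fields' rows'

def extract_data_block_py_alt (text : String) : List String × List (List String) :=
  pvOneLoop (PySem.Str.splitlines text) false false [] []

-- ===== PRECONDITION & SPEC =====
def Spec_extract_data_block_py (text : String) (out : List String × List (List String)) : Prop := out = extract_data_block_py_alt text
instance (text : String) (out : List String × List (List String)) : Decidable (Spec_extract_data_block_py text out) := by unfold Spec_extract_data_block_py; infer_instance

-- ===== CLAIM (what is proved, stated in full; the proofs are below) =====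
def Claim_equal_extract_data_block_py : Prop := ∀ (text : String), Dom_extract_data_block_py text → Spec_extract_data_block_py text (extract_data_block_py text)

-- ===== LEMMAS AND PROOFS =====
-- The one-pass loop computes exactly the pair of A's two loops, for every state.
theorem pvOneLoop_eq (ls : List String) :
    ∀ (f d : Bool) (fields : List String) (rows : List (List String)),
      pvOneLoop ls f d fields rows = (pvFieldLoop ls f fields, pvDataLoop ls d rows) := by
  induction ls with
  | nil => intro f d fields rows; rfl
  | cons line rest ih =>
    intro f d fields rows
    simp only [pvOneLoop, pvFieldLoop, pvDataLoop]
    split_ifs <;> simp [ih]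

-- ===== VERDICT (by name: the statement is the Claim_ definition above) =====
theorem extract_data_block_py_spec : Claim_equal_extract_data_block_py := by
  intro text _
  unfold Spec_extract_data_block_py extract_data_block_py extract_data_block_py_alt
  exact (pvOneLoop_eq _ false false [] []).symm
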